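-- pv_equiv track=rewrite | github.com/sokie/kirov-server-emulator | app/servers/automatch/base.py | find_common_maps
-- ===== SOURCE A (Python) =====
-- def find_common_maps(bitset1: str, bitset2: str) -> str:
--     """
--     AND two map bitsets. Returns empty string if no common maps.
--
--     Each character is '1' (available) or '0' (unavailable).
--     Bitsets must be the same length.
--     """
--     if not bitset1 or not bitset2 or len(bitset1) != len(bitset2):
--         return ""
--
--     result = ""
--     has_common = False
--     for c1, c2 in zip(bitset1, bitset2):
--         if c1 == "1" and c2 == "1":
--             result += "1"
--             has_common = True
--         else:
--             result += "0"
--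
--     return result if has_common else ""
-- ===== SOURCE B (Python) =====
-- def find_common_maps(bitset1: str, bitset2: str) -> str:
--     if not bitset1 or not bitset2 or len(bitset1) != len(bitset2):
--         return ""
--     ones1 = {i for i, c in enumerate(bitset1) if c == "1"}
--     ones2 = {i for i, c in enumerate(bitset2) if c == "1"}
--     common = ones1 & ones2
--     if not common:
--         return ""
--     return "".join("1" if i in common else "0" for i in range(len(bitset1)))
-- ===== Notes on version B (the rewrite author's own statement) =====
-- stated objective: alternative
-- what changed: Represents each bitset as the set of indices of '1' characters, intersects the two index sets, and reconstructs the output string from the intersection, instead of scanning character pairs with a running has_common flag.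
import Mathlib
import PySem

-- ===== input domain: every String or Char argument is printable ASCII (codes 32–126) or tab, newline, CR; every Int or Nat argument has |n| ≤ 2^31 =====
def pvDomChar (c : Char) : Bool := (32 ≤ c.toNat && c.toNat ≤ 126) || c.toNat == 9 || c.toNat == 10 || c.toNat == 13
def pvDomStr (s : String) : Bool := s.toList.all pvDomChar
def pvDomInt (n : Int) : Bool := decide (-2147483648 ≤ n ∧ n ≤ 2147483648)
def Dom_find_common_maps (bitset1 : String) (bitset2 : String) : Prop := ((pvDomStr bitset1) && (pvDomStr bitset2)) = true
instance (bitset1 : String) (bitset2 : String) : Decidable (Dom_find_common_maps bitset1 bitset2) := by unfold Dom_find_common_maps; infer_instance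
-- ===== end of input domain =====

-- B re-implements A by building the index sets of '1' positions, intersecting them, and
-- reconstructing the output string from the intersection (alternative decomposition; same cost).


-- ===== PORT A =====
-- string building done on List Char (exact; Lean's String.append is kernel-opaque)
def find_common_maps (bitset1 : String) (bitset2 : String) : String :=
  if bitset1.toList = [] ∨ bitset2.toList = [] ∨ bitset1.toList.length ≠ bitset2.toList.length then
    ""
  else
    let st := (bitset1.toList.zip bitset2.toList).foldl
      (fun (st : List Char × Bool) p =>
        if p.1 = '1' ∧ p.2 = '1' then (st.1 ++ ['1'], true) else (st.1 ++ ['0'], st.2))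
      ([], false)
    if st.2 then String.ofList st.1 else ""

-- ===== PORT B =====
-- {i for i, c in enumerate(s) if c == "1"}  (a Python set of indices)
def pvOnes (s : String) : List Int :=
  PySem.Set.ofList ((PySem.List.enumerate s.toList).filterMap
    (fun p => if p.2 = '1' then some p.1 else none))

-- ones1 & ones2
def pvCommon (bitset1 : String) (bitset2 : String) : List Int :=
  (pvOnes bitset1).filter (fun i => i ∈ pvOnes bitset2)

def find_common_maps_alt (bitset1 : String) (bitset2 : String) : String :=
  if bitset1.toList = [] ∨ bitset2.toList = [] ∨ bitset1.toList.length ≠ bitset2.toList.length then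
    ""
  else
    let common := pvCommon bitset1 bitset2
    if common = [] then ""
    else String.ofList ((PySem.List.pyRange 0 (bitset1.toList.length) 1).map
      (fun i => if i ∈ common then '1' else '0'))

-- ===== PRECONDITION & SPEC =====
def Spec_find_common_maps (bitset1 : String) (bitset2 : String) (out : String) : Prop := out = find_common_maps_alt bitset1 bitset2
instance (bitset1 : String) (bitset2 : String) (out : String) : Decidable (Spec_find_common_maps bitset1 bitset2 out) := by unfold Spec_find_common_maps; infer_instance

-- ===== CLAIM (what is proved, stated in full; the proofs are below) =====
def Claim_equal_find_common_maps : Prop := ∀ (bitset1 : String) (bitset2 : String), Dom_find_common_maps bitset1 bitset2 → Spec_find_common_maps bitset1 bitset2 (find_common_maps bitset1 bitset2)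

-- ===== LEMMAS AND PROOFS =====

theorem pv_foldA (zs : List (Char × Char)) (acc : List Char) (b : Bool) :
    zs.foldl
      (fun (st : List Char × Bool) p =>
        if p.1 = '1' ∧ p.2 = '1' then (st.1 ++ ['1'], true) else (st.1 ++ ['0'], st.2))
      (acc, b)
    = (acc ++ zs.map (fun p => if p.1 = '1' ∧ p.2 = '1' then '1' else '0'),
       b || zs.any (fun p => p.1 = '1' && p.2 = '1')) := by
  induction zs generalizing acc b with
  | nil => simp
  | cons p t ih =>
    rcases Decidable.em (p.1 = '1') with h1 | h1 <;>
      rcases Decidable.em (p.2 = '1') with h2 | h2 <;>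
        simp [h1, h2, ih]

theorem pv_mem_ones (s : String) (i : Int) :
    i ∈ pvOnes s ↔ ∃ k : Nat, ∃ _ : k < s.toList.length, i = (k : Int) ∧ s.toList[k] = '1' := by
  unfold pvOnes
  rw [PySem.Set.mem_ofList]
  simp only [List.mem_filterMap, PySem.List.mem_enumerate_iff]
  constructor
  · rintro ⟨⟨j, c⟩, ⟨k, hk, hp⟩, hif⟩
    cases hp
    by_cases hc : s.toList[k] = '1'
    · exact ⟨k, hk, by simpa [hc] using hif.symm, hc⟩
    · simp [hc] at hif
  · rintro ⟨k, hk, rfl, hc⟩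
    exact ⟨((k : Int), s.toList[k]), ⟨k, hk, by simp⟩, by simp [hc]⟩

theorem pv_mem_common (b1 b2 : String) (hlen : b1.toList.length = b2.toList.length)
    (k : Nat) (hk : k < b1.toList.length) :
    ((k : Int) ∈ pvCommon b1 b2) ↔
      (b1.toList[k] = '1' ∧ b2.toList[k]'(hlen ▸ hk) = '1') := by
  unfold pvCommon
  rw [List.mem_filter]
  simp only [decide_eq_true_eq, pv_mem_ones]
  constructor
  · rintro ⟨⟨j, hj, hje, hc1⟩, ⟨m, hm, hme, hc2⟩⟩
    have hjk : j = k := by exact_mod_cast hje.symm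
    have hmk : m = k := by exact_mod_cast hme.symm
    subst hjk; subst hmk
    exact ⟨hc1, hc2⟩
  · rintro ⟨hc1, hc2⟩
    exact ⟨⟨k, hk, rfl, hc1⟩, ⟨k, hlen ▸ hk, rfl, hc2⟩⟩

theorem pv_flag (b1 b2 : String) (hlen : b1.toList.length = b2.toList.length) :
    ((b1.toList.zip b2.toList).any (fun p => p.1 = '1' && p.2 = '1') = true)
      ↔ pvCommon b1 b2 ≠ [] := by
  rw [List.any_eq_true]
  constructor
  · rintro ⟨p, hp, hc⟩
    obtain ⟨k, hk, hget⟩ := List.mem_iff_getElem.mp hp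
    have hk1 : k < b1.toList.length := by
      simp only [List.length_zip] at hk; omega
    have hz : (b1.toList.zip b2.toList)[k] =
        (b1.toList[k]'hk1, b2.toList[k]'(hlen ▸ hk1)) := List.getElem_zip
    rw [hz] at hget
    intro he
    have hmem : (k : Int) ∈ pvCommon b1 b2 := by
      rw [pv_mem_common b1 b2 hlen k hk1]
      rw [← hget] at hc
      simpa using hc
    rw [he] at hmem
    simp at hmem
  · intro hne
    obtain ⟨i, hi⟩ := List.exists_mem_of_ne_nil (pvCommon b1 b2) hne
    have hi1 : i ∈ pvOnes b1 := (List.mem_filter.mp hi).1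
    obtain ⟨k, hk, rfl, -⟩ := (pv_mem_ones b1 i).mp hi1
    obtain ⟨hc1, hc2⟩ := (pv_mem_common b1 b2 hlen k hk).mp hi
    have hkz : k < (b1.toList.zip b2.toList).length := by
      simp only [List.length_zip]; omega
    refine ⟨(b1.toList.zip b2.toList)[k], List.getElem_mem hkz, ?_⟩
    have hz : (b1.toList.zip b2.toList)[k] =
        (b1.toList[k]'hk, b2.toList[k]'(hlen ▸ hk)) := List.getElem_zip
    rw [hz]
    simp [hc1, hc2]

theorem pv_strings (b1 b2 : String) (hlen : b1.toList.length = b2.toList.length) :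
    (b1.toList.zip b2.toList).map (fun p => if p.1 = '1' ∧ p.2 = '1' then '1' else '0')
      = (PySem.List.pyRange 0 (b1.toList.length) 1).map
          (fun i => if i ∈ pvCommon b1 b2 then '1' else '0') := by
  rw [show ((b1.toList.length : Int)) = ((b1.toList.length : Nat) : Int) from rfl,
      PySem.List.pyRange_zero_natCast, List.map_map]
  apply List.ext_getElem
  · simp [hlen]
  · intro k hk hk'
    have hkn : k < b1.toList.length := by
      simp only [List.length_map, List.length_zip] at hk; omega
    have hz : (b1.toList.zip b2.toList)[k]'(by simp only [List.length_zip]; omega) =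
        (b1.toList[k]'hkn, b2.toList[k]'(hlen ▸ hkn)) := List.getElem_zip
    simp only [List.getElem_map, List.getElem_range, Function.comp_apply, hz]
    by_cases hb : b1.toList[k]'hkn = '1' ∧ b2.toList[k]'(hlen ▸ hkn) = '1'
    · rw [if_pos hb, if_pos ((pv_mem_common b1 b2 hlen k hkn).mpr hb)]
    · rw [if_neg hb, if_neg (fun h => hb ((pv_mem_common b1 b2 hlen k hkn).mp h))]

-- ===== VERDICT (by name: the statement is the Claim_ definition above) =====
theorem find_common_maps_spec : Claim_equal_find_common_maps := by
  intro b1 b2 _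
  unfold Spec_find_common_maps find_common_maps find_common_maps_alt
  split_ifs with hg
  · rfl
  · rw [not_or, not_or] at hg
    obtain ⟨-, -, hlen⟩ := hg
    rw [Decidable.not_not] at hlen
    rw [pv_foldA]
    simp only [List.nil_append, Bool.false_or]
    by_cases hc : pvCommon b1 b2 = []
    · have : (b1.toList.zip b2.toList).any (fun p => p.1 = '1' && p.2 = '1') = false := by
        rcases Bool.eq_false_or_eq_true ((b1.toList.zip b2.toList).any
          (fun p => p.1 = '1' && p.2 = '1')) with h | h
        · exact absurd hc ((pv_flag b1 b2 hlen).mp h)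
        · exact h
      rw [this, if_neg (by simp), if_pos hc]
    · rw [(pv_flag b1 b2 hlen).mpr hc, if_pos rfl, if_neg hc, pv_strings b1 b2 hlen]
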